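-- pv_equiv track=rewrite | github.com/wcwright124/my_sols | 05/5-5.py | remove_duplicates1
-- ===== SOURCE A (Python) =====
-- def remove_duplicates1(arr, key):
--     write_idx = 0
--     i = 0
--     while i < len(arr) and write_idx < len(arr):
--         if arr[i] != key:
--             arr[write_idx] = arr[i]
--             write_idx += 1
--             i += 1
--         else:
--             i += 1
--     return arr, write_idx
-- ===== SOURCE B (Python) =====
-- def remove_duplicates1(arr, key):
--     filtered = [x for x in arr if x != key]
--     for i, v in enumerate(filtered):
--         arr[i] = v
--     return arr, len(filtered)
-- ===== Notes on version B (the rewrite author's own statement) =====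
-- stated objective: simpler
-- what changed: Replaces the single fused two-pointer read/write while-loop with two plain passes: a list-comprehension filter building an auxiliary list, then a copy of that list back into arr's prefix.
import Mathlib
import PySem

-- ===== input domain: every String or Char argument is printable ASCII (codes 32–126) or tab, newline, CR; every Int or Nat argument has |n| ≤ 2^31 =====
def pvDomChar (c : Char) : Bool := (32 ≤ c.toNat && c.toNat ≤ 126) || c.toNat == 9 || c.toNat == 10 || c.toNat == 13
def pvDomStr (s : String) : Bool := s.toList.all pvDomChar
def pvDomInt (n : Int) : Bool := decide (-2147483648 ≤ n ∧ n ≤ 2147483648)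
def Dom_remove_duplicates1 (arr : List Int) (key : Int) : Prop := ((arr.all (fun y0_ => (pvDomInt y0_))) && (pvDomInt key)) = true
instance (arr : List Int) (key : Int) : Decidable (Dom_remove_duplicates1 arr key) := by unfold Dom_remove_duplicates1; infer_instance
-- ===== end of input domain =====

-- B replaces the fused two-pointer in-place while-loop with a filter pass plus a copy-back pass
-- (objective: simpler). Both Pythons mutate arr in place; the equivalence proved is about the return value.

-- ===== PORT A =====
-- A's while loop: i is the read pointer, w the write pointer; recursion on i.
def pvLoopA (arr : List Int) (key : Int) (i w : Nat) : List Int × Int :=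
  if _h : i < arr.length ∧ w < arr.length then
    let x := arr.getD i 0
    if x ≠ key then
      pvLoopA (arr.set w x) key (i + 1) (w + 1)
    else
      pvLoopA arr key (i + 1) w
  else (arr, (w : Int))
termination_by arr.length - i
decreasing_by all_goals (try simp only [List.length_set]); all_goals omega

def remove_duplicates1 (arr : List Int) (key : Int) : List Int × Int :=
  pvLoopA arr key 0 0

-- ===== PORT B =====
def remove_duplicates1_alt (arr : List Int) (key : Int) : List Int × Int :=
  let filtered := arr.filter (fun x => x ≠ key)
  ((PySem.List.enumerate filtered).foldl (fun a p => PySem.List.pySetD a p.1 p.2) arr,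
   (filtered.length : Int))

-- ===== PRECONDITION & SPEC =====
def Spec_remove_duplicates1 (arr : List Int) (key : Int) (out : List Int × Int) : Prop := out = remove_duplicates1_alt arr key
instance (arr : List Int) (key : Int) (out : List Int × Int) : Decidable (Spec_remove_duplicates1 arr key out) := by unfold Spec_remove_duplicates1; infer_instance

-- ===== CLAIM (what is proved, stated in full; the proofs are below) =====
def Claim_equal_remove_duplicates1 : Prop := ∀ (arr : List Int) (key : Int), Dom_remove_duplicates1 arr key → Spec_remove_duplicates1 arr key (remove_duplicates1 arr key)

-- ===== LEMMAS AND PROOFS =====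

-- write-back: write the list vs into a starting at position w
def pvWB (a : List Int) (w : Nat) : List Int → List Int
  | [] => a
  | v :: vs => pvWB (a.set w v) (w + 1) vs

-- B's foldl over enumerate is pvWB from the start index
theorem pvFold_eq_WB (vs : List Int) : ∀ (a : List Int) (s : Nat),
    (PySem.List.enumerate vs (s : Int)).foldl (fun a p => PySem.List.pySetD a p.1 p.2) a
      = pvWB a s vs := by
  induction vs with
  | nil => intro a s; simp [PySem.List.enumerate_nil, pvWB]
  | cons v vs ih =>
    intro a s
    have : ((s : Int) + 1) = ((s + 1 : Nat) : Int) := by push_cast; ring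
    simp only [PySem.List.enumerate_cons, List.foldl_cons, this, ih, pvWB,
      PySem.List.pySetD_natCast]

-- setting before the drop point leaves the drop unchanged
theorem pvSet_drop (a : List Int) (w j : Nat) (v : Int) (h : w < j) :
    (a.set w v).drop j = a.drop j := by
  apply List.ext_getElem
  · simp
  · intro k _ _
    simp only [List.getElem_drop, List.getElem_set]
    have : w ≠ j + k := by omega
    simp [this]

-- main invariant of A's loop
theorem pvLoopA_eq (n : Nat) : ∀ (arr : List Int) (key : Int) (i w : Nat),
    arr.length - i ≤ n → w ≤ i →
    pvLoopA arr key i w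
      = (pvWB arr w ((arr.drop i).filter (fun x => x ≠ key)),
         ((w + ((arr.drop i).filter (fun x => x ≠ key)).length : Nat) : Int)) := by
  induction n with
  | zero =>
    intro arr key i w hn hw
    have hi : arr.length ≤ i := by omega
    have : ¬ (i < arr.length ∧ w < arr.length) := by omega
    rw [pvLoopA, dif_neg this]
    simp [List.drop_eq_nil_of_le hi, pvWB]
  | succ n ih =>
    intro arr key i w hn hw
    by_cases hi : i < arr.length
    · have hcond : i < arr.length ∧ w < arr.length := ⟨hi, by omega⟩
      have hdrop : arr.drop i = arr[i] :: arr.drop (i + 1) :=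
        List.drop_eq_getElem_cons hi
      have hget : arr.getD i 0 = arr[i] := by
        simp [List.getD, List.getElem?_eq_getElem hi]
      rw [pvLoopA, dif_pos hcond]
      dsimp only
      rw [hget]
      by_cases hx : arr[i] ≠ key
      · rw [if_pos hx]
        rw [ih (arr.set w arr[i]) key (i + 1) (w + 1) (by simp; omega) (by omega)]
        rw [pvSet_drop arr w (i + 1) arr[i] (by omega)]
        rw [hdrop, List.filter_cons]
        simp [hx, pvWB]
        omega
      · rw [if_neg hx]
        rw [not_not] at hx
        rw [ih arr key (i + 1) w (by omega) (by omega)]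
        rw [hdrop]
        simp [hx]
    · have : ¬ (i < arr.length ∧ w < arr.length) := by omega
      rw [pvLoopA, dif_neg this]
      simp [List.drop_eq_nil_of_le (by omega : arr.length ≤ i), pvWB]

-- ===== VERDICT (by name: the statement is the Claim_ definition above) =====
theorem remove_duplicates1_spec : Claim_equal_remove_duplicates1 := by
  intro arr key _
  unfold Spec_remove_duplicates1 remove_duplicates1 remove_duplicates1_alt
  rw [pvLoopA_eq arr.length arr key 0 0 (by omega) (by omega)]
  dsimp only
  rw [show (0 : Int) = ((0 : Nat) : Int) from rfl, pvFold_eq_WB]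
  simp
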